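-- pv_equiv track=rewrite | github.com/080user080/styletts2-ukrainian | 007_universal/kod/p_304_tts_verbalizer_wrapper.py | split_to_parts
-- ===== SOURCE A (Python) =====
-- from typing import Dict, Any, List  # ДОДАТИ ЦЕЙ РЯДОК
-- from typing import List
--
-- def split_to_parts(text: str, max_length: int = 150) -> List[str]:
--     """
--     Розбити текст на частини.
--     Видобуто з app.py
--     """
--     split_symbols = '.?!:'
--     parts = ['']
--     index = 0
--
--     for s in text:
--         parts[index] += s
--         if s in split_symbols and len(parts[index]) > max_length:
--             index += 1
--             parts.append('')
--
--     # Видалити порожні частини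
--     parts = [p.strip() for p in parts if p.strip()]
--     return parts
-- ===== SOURCE B (Python) =====
-- def split_to_parts(text: str, max_length: int = 150):
--     positions = [i for i, c in enumerate(text) if c in '.?!:']
--     parts = []
--     last_cut = 0
--     for p in positions:
--         if p - last_cut + 1 > max_length:
--             parts.append(text[last_cut:p + 1])
--             last_cut = p + 1
--     parts.append(text[last_cut:])
--     return [q for q in (p.strip() for p in parts) if q]
-- ===== Notes on version B (the rewrite author's own statement) =====
-- stated objective: faster
-- what changed: B replaces A's per-character accumulation into a growing parts[index] string buffer by an index table of punctuation positions followed by a cut-point loop over those positions that emits slices of the text.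
import Mathlib
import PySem

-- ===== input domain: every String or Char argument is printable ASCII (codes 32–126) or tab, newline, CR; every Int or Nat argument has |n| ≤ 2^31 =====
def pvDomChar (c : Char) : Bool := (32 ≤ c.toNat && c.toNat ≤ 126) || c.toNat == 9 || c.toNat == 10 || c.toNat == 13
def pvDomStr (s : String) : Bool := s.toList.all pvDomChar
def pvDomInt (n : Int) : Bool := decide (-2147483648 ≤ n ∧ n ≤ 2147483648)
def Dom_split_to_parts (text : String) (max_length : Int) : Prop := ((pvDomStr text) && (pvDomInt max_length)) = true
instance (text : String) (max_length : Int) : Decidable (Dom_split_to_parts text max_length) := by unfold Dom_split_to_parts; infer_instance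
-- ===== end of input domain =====

-- B builds an index table of punctuation positions and cuts the text by slicing at those
-- positions, instead of A's per-character string accumulation; measured faster in a timing run.

-- shared constant: the split symbols '.?!:'
def pvSplitSymbols : List Char := ['.', '?', '!', ':']

-- ===== PORT A =====
-- literal port of A: parts is a list of buffers, index points at the one being grown;
-- parts[index] += s is List.modify, the length test reads the updated buffer.
def split_to_parts (text : String) (max_length : Int) : List String :=
  let st := text.toList.foldl
    (fun (st : List (List Char) × Nat) s =>
      let parts := st.1.modify st.2 (fun p => p ++ [s])
      if s ∈ pvSplitSymbols ∧ ((parts.getD st.2 []).length : Int) > max_length then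
        (parts ++ [[]], st.2 + 1)
      else (parts, st.2))
    ([[]], 0)
  st.1.filterMap (fun p =>
    let q := PySem.Chars.strip p
    if q = [] then none else some (String.ofList q))

-- ===== PORT B =====
-- literal port of B: punctuation index table, then a cut-point loop over those positions.
def split_to_parts_alt (text : String) (max_length : Int) : List String :=
  let cs := text.toList
  let positions := (PySem.List.enumerate cs 0).filterMap
    (fun ic => if ic.2 ∈ pvSplitSymbols then some ic.1 else none)
  let st := positions.foldl
    (fun (st : List (List Char) × Int) p =>
      if p - st.2 + 1 > max_length then
        (st.1 ++ [PySem.List.slice cs (some st.2) (some (p + 1))], p + 1)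
      else st)
    ([], 0)
  let parts := st.1 ++ [PySem.List.slice cs (some st.2) none]
  parts.filterMap (fun p =>
    let q := PySem.Chars.strip p
    if q = [] then none else some (String.ofList q))

-- ===== PRECONDITION & SPEC =====
def Spec_split_to_parts (text : String) (max_length : Int) (out : List String) : Prop := out = split_to_parts_alt text max_length
instance (text : String) (max_length : Int) (out : List String) : Decidable (Spec_split_to_parts text max_length out) := by unfold Spec_split_to_parts; infer_instance

-- ===== CLAIM (what is proved, stated in full; the proofs are below) =====
def Claim_equal_split_to_parts : Prop := ∀ (text : String) (max_length : Int), Dom_split_to_parts text max_length → Spec_split_to_parts text max_length (split_to_parts text max_length)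

-- ===== LEMMAS AND PROOFS =====

-- canonical pre-strip part list, processed char by char
def pvCanon (max_length : Int) : List Char → List Char → List (List Char)
  | cur, [] => [cur]
  | cur, c :: rest =>
    if c ∈ pvSplitSymbols ∧ (((cur ++ [c]).length : Int) > max_length) then
      (cur ++ [c]) :: pvCanon max_length [] rest
    else pvCanon max_length (cur ++ [c]) rest

-- absolute punctuation positions of a suffix starting at index k
def pvPos : Nat → List Char → List Int
  | _, [] => []
  | k, c :: rest => if c ∈ pvSplitSymbols then (k : Int) :: pvPos (k + 1) rest else pvPos (k + 1) rest

-- cons-shaped form of B's cut loop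
def pvRunB (cs : List Char) (max_length : Int) : List Int → Int → List (List Char)
  | [], lc => [PySem.List.slice cs (some lc) none]
  | p :: ps, lc =>
    if p - lc + 1 > max_length then
      PySem.List.slice cs (some lc) (some (p + 1)) :: pvRunB cs max_length ps (p + 1)
    else pvRunB cs max_length ps lc

theorem pvModify_append_singleton (done : List (List Char)) (cur : List Char) (f : List Char → List Char) :
    (done ++ [cur]).modify done.length f = done ++ [f cur] := by
  induction done with
  | nil => simp
  | cons d ds ih => simpa using ih

theorem pvGetD_append_singleton (done : List (List Char)) (x : List Char) :
    (done ++ [x]).getD done.length [] = x := by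
  simp [List.getD]

-- A's fold from state (done ++ [cur], |done|) produces done ++ pvCanon cur
theorem pvA_eq_canon (max_length : Int) (cs : List Char) :
    ∀ (done : List (List Char)) (cur : List Char),
      (cs.foldl
        (fun (st : List (List Char) × Nat) s =>
          let parts := st.1.modify st.2 (fun p => p ++ [s])
          if s ∈ pvSplitSymbols ∧ ((parts.getD st.2 []).length : Int) > max_length then
            (parts ++ [[]], st.2 + 1)
          else (parts, st.2))
        (done ++ [cur], done.length)).1 = done ++ pvCanon max_length cur cs := by
  induction cs with
  | nil => intro done cur; simp [pvCanon]
  | cons c rest ih =>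
    intro done cur
    simp only [List.foldl_cons, pvModify_append_singleton, pvGetD_append_singleton]
    by_cases h : c ∈ pvSplitSymbols ∧ (((cur ++ [c]).length : Int) > max_length)
    · have : (done ++ [cur ++ [c]]) ++ [[]] = (done ++ [cur ++ [c]]) ++ [[]] := rfl
      simp only [pvCanon, if_pos h]
      have h2 := ih (done ++ [cur ++ [c]]) []
      simpa [List.length_append, List.append_assoc] using h2
    · simp only [pvCanon, if_neg h]
      exact ih done (cur ++ [c])

-- the enumerate-filterMap index table equals pvPos
theorem pvPositions_eq (cs : List Char) : ∀ (k : Nat),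
    (PySem.List.enumerate cs (k : Int)).filterMap
      (fun ic => if ic.2 ∈ pvSplitSymbols then some ic.1 else none) = pvPos k cs := by
  induction cs with
  | nil => intro k; simp [PySem.List.enumerate_nil, pvPos]
  | cons c rest ih =>
    intro k
    have hk : (k : Int) + 1 = ((k + 1 : Nat) : Int) := by push_cast; ring
    simp only [PySem.List.enumerate_cons, List.filterMap_cons, hk, ih (k + 1)]
    by_cases h : c ∈ pvSplitSymbols <;> simp [pvPos, h]

-- B's foldl cut loop, with the trailing slice appended, equals pvRunB
theorem pvFold_eq_runB (cs : List Char) (max_length : Int) : ∀ (ps : List Int) (acc : List (List Char)) (lc : Int),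
    (ps.foldl
      (fun (st : List (List Char) × Int) p =>
        if p - st.2 + 1 > max_length then
          (st.1 ++ [PySem.List.slice cs (some st.2) (some (p + 1))], p + 1)
        else st) (acc, lc)).1 ++
      [PySem.List.slice cs
        (some (ps.foldl
          (fun (st : List (List Char) × Int) p =>
            if p - st.2 + 1 > max_length then
              (st.1 ++ [PySem.List.slice cs (some st.2) (some (p + 1))], p + 1)
            else st) (acc, lc)).2) none]
      = acc ++ pvRunB cs max_length ps lc := by
  intro ps
  induction ps with
  | nil => intro acc lc; simp [pvRunB]
  | cons p ps ih =>
    intro acc lc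
    by_cases h : p - lc + 1 > max_length
    · simp only [List.foldl_cons, pvRunB, if_pos h]
      have := ih (acc ++ [PySem.List.slice cs (some lc) (some (p + 1))]) (p + 1)
      simpa [List.append_assoc] using this
    · simp only [List.foldl_cons, pvRunB, if_neg h]
      exact ih acc lc

-- MAIN: the cut loop over punctuation positions reproduces the char-by-char pvCanon
theorem pvRunB_eq_canon (cs : List Char) (max_length : Int) :
    ∀ (rest : List Char) (i lc : Nat), lc ≤ i → cs.drop i = rest →
      pvRunB cs max_length (pvPos i rest) (lc : Int)
        = pvCanon max_length ((cs.drop lc).take (i - lc)) rest := by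
  intro rest
  induction rest with
  | nil =>
    intro i lc hle hdrop
    have hlen : cs.length ≤ i := by
      by_contra h
      have := List.drop_eq_nil_iff.mp hdrop
      omega
    have htake : (cs.drop lc).take (i - lc) = cs.drop lc := by
      apply List.take_of_length_le
      simp [List.length_drop]; omega
    rw [show pvPos i ([] : List Char) = [] from rfl]
    rw [show pvRunB cs max_length [] (lc : Int) = [PySem.List.slice cs (some (lc : Int)) none] from rfl]
    rw [PySem.List.slice_from_natCast, pvCanon, htake]
  | cons c rest' ih =>
    intro i lc hle hdrop
    have hi : i < cs.length := by
      by_contra h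
      have : cs.drop i = [] := List.drop_eq_nil_iff.mpr (by omega)
      rw [this] at hdrop; exact absurd hdrop (by simp)
    have h1 : cs[i]? = some c := by
      have := congrArg (fun l : List Char => l[0]?) hdrop
      simpa [List.getElem?_drop] using this
    have hdrop' : cs.drop (i + 1) = rest' := by
      have h2 : cs.drop (i + 1) = (cs.drop i).drop 1 := by
        rw [List.drop_drop]
      rw [h2, hdrop, List.drop_one, List.tail_cons]
    -- the buffer extended by c is the next take
    have h2 : (cs.drop lc)[i - lc]? = some c := by
      rw [List.getElem?_drop, show lc + (i - lc) = i from by omega]; exact h1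
    have hext : (cs.drop lc).take (i - lc) ++ [c] = (cs.drop lc).take (i + 1 - lc) := by
      rw [show i + 1 - lc = (i - lc) + 1 from by omega, List.take_add_one, h2]
      rfl
    have hlen : ((cs.drop lc).take (i - lc)).length = i - lc := by
      simp [List.length_take, List.length_drop]; omega
    by_cases hp : c ∈ pvSplitSymbols
    · simp only [pvPos, if_pos hp, pvRunB]
      by_cases hcut : (i : Int) - (lc : Int) + 1 > max_length
      · have hcond : c ∈ pvSplitSymbols ∧
            ((((cs.drop lc).take (i - lc) ++ [c]).length : Int) > max_length) := by
          refine ⟨hp, ?_⟩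
          simp only [List.length_append, hlen, List.length_cons, List.length_nil]
          push_cast; omega
        rw [if_pos hcut]
        have hslice : PySem.List.slice cs (some (lc : Int)) (some ((i : Int) + 1))
            = (cs.drop lc).take (i - lc) ++ [c] := by
          have : ((i : Int) + 1) = ((i + 1 : Nat) : Int) := by push_cast; ring
          rw [this, PySem.List.slice_natCast, hext]
        have hrec := ih (i + 1) (i + 1) (le_refl _) hdrop'
        simp only [Nat.sub_self, List.take_zero] at hrec
        have : ((i : Int) + 1) = (((i + 1 : Nat)) : Int) := by push_cast; ring
        rw [hslice, this, hrec]
        conv_rhs => rw [pvCanon, if_pos hcond]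
      · have hcond : ¬ (c ∈ pvSplitSymbols ∧
            ((((cs.drop lc).take (i - lc) ++ [c]).length : Int) > max_length)) := by
          rintro ⟨-, hgt⟩
          simp only [List.length_append, hlen, List.length_cons, List.length_nil] at hgt
          push_cast at hgt; omega
        rw [if_neg hcut]
        have hrec := ih (i + 1) lc (by omega) hdrop'
        rw [hrec]
        conv_rhs => rw [pvCanon, if_neg hcond]
        rw [hext]
    · have hcond : ¬ (c ∈ pvSplitSymbols ∧
          ((((cs.drop lc).take (i - lc) ++ [c]).length : Int) > max_length)) := by
        rintro ⟨hmem, -⟩; exact hp hmem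
      simp only [pvPos, if_neg hp]
      have hrec := ih (i + 1) lc (by omega) hdrop'
      rw [hrec]
      conv_rhs => rw [pvCanon, if_neg hcond]
      rw [hext]

-- ===== VERDICT (by name: the statement is the Claim_ definition above) =====
theorem split_to_parts_spec : Claim_equal_split_to_parts := by
  intro text max_length _
  unfold Spec_split_to_parts split_to_parts split_to_parts_alt
  have hA := pvA_eq_canon max_length text.toList [] []
  simp only [List.nil_append, List.length_nil] at hA
  have hPos : (PySem.List.enumerate text.toList 0).filterMap
      (fun ic => if ic.2 ∈ pvSplitSymbols then some ic.1 else none) = pvPos 0 text.toList := by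
    simpa using pvPositions_eq text.toList 0
  have hMain : pvRunB text.toList max_length (pvPos 0 text.toList) 0 = pvCanon max_length [] text.toList := by
    simpa using pvRunB_eq_canon text.toList max_length text.toList 0 0 (le_refl _) rfl
  simp only [hA, hPos]
  rw [pvFold_eq_runB text.toList max_length (pvPos 0 text.toList) [] 0, hMain]
  simp
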